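-- pv_equiv track=rewrite | github.com/janine-orz/Supply_chain_Network_Criticality | networkSC_test_poisson.py | NUM_OF_NODE_AIOT
-- ===== SOURCE A (Python) =====
-- def NUM_OF_NODE_AIOT(node_list_a): # AIOT: adjacent in one tier
--     number_of_node_R = 0
--     number_of_node_S = 0
--     number_of_node_C = 0
--     for node in node_list_a:
--         if (node[0] == "R"):
--             number_of_node_R += 1
--         elif (node[0] == "S"):
--             number_of_node_S += 1
--         elif (node[0] == "C"):
--             number_of_node_C += 1
--     return number_of_node_R, number_of_node_S, number_of_node_C
-- ===== SOURCE B (Python) =====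
-- def NUM_OF_NODE_AIOT(node_list_a): # AIOT: adjacent in one tier
--     # Staged passes: project to first characters once, then count each key
--     # by a separate scan of the projection (no accumulators, no branches).
--     firsts = [node[0] for node in node_list_a]
--     return firsts.count("R"), firsts.count("S"), firsts.count("C")
-- ===== Notes on version B (the rewrite author's own statement) =====
-- stated objective: simpler
-- what changed: B replaces A's single branch-driven loop with three scalar accumulators by staged passes: one projection to first characters, then three independent .count scans of that projection.
import Mathlib
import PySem

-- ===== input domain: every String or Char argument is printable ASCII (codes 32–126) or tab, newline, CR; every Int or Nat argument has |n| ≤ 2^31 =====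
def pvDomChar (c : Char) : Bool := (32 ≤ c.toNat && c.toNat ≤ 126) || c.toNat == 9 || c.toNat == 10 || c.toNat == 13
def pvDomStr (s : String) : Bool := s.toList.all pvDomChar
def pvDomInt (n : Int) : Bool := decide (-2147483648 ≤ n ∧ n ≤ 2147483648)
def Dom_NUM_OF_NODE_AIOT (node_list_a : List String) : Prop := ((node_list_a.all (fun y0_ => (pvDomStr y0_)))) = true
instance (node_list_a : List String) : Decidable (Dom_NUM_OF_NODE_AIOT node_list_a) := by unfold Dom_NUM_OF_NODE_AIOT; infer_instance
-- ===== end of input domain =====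

-- B replaces A's branch-driven loop with three accumulators by staged passes: one projection to first characters, then three independent count scans (simpler; same cost).


-- ===== PORT A =====
def NUM_OF_NODE_AIOT (node_list_a : List String) : Int × Int × Int :=
  node_list_a.foldl
    (fun acc node =>
      if PySem.Str.pyGet? node 0 = some 'R' then (acc.1 + 1, acc.2.1, acc.2.2)
      else if PySem.Str.pyGet? node 0 = some 'S' then (acc.1, acc.2.1 + 1, acc.2.2)
      else if PySem.Str.pyGet? node 0 = some 'C' then (acc.1, acc.2.1, acc.2.2 + 1)
      else acc)
    (0, 0, 0)

-- ===== PORT B =====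
-- node[0]; the default is never reached under Pre_ (Python raises IndexError there)
def pvFirstChar (node : String) : Char := (PySem.Str.pyGet? node 0).getD ' '

def NUM_OF_NODE_AIOT_alt (node_list_a : List String) : Int × Int × Int :=
  let firsts := node_list_a.map pvFirstChar
  ((firsts.count 'R' : Int), (firsts.count 'S' : Int), (firsts.count 'C' : Int))

-- ===== PRECONDITION & SPEC =====
-- Pre_ excludes lists containing an empty string: there node[0] raises IndexError in both Pythons.
def Pre_NUM_OF_NODE_AIOT (node_list_a : List String) : Prop := ∀ s ∈ node_list_a, s ≠ ""
instance (node_list_a : List String) : Decidable (Pre_NUM_OF_NODE_AIOT node_list_a) := by unfold Pre_NUM_OF_NODE_AIOT; infer_instance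
def pvWitness_NUM_OF_NODE_AIOT : List String := ["R1", "S2", "C3", "R4", "x"]

def Spec_NUM_OF_NODE_AIOT (node_list_a : List String) (out : Int × Int × Int) : Prop := out = NUM_OF_NODE_AIOT_alt node_list_a
instance (node_list_a : List String) (out : Int × Int × Int) : Decidable (Spec_NUM_OF_NODE_AIOT node_list_a out) := by unfold Spec_NUM_OF_NODE_AIOT; infer_instance

-- ===== CLAIM (what is proved, stated in full; the proofs are below) =====
def Claim_equal_NUM_OF_NODE_AIOT : Prop := ∀ (node_list_a : List String), Dom_NUM_OF_NODE_AIOT node_list_a → Pre_NUM_OF_NODE_AIOT node_list_a → Spec_NUM_OF_NODE_AIOT node_list_a (NUM_OF_NODE_AIOT node_list_a)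

-- ===== LEMMAS AND PROOFS =====

-- A's loop from an arbitrary accumulator adds the counts of 'R','S','C' among the first characters.
theorem pv_loopA_eq (xs : List String) (r s c : Int) :
    xs.foldl
      (fun acc node =>
        if PySem.List.pyGet? node.toList 0 = some 'R' then (acc.1 + 1, acc.2.1, acc.2.2)
        else if PySem.List.pyGet? node.toList 0 = some 'S' then (acc.1, acc.2.1 + 1, acc.2.2)
        else if PySem.List.pyGet? node.toList 0 = some 'C' then (acc.1, acc.2.1, acc.2.2 + 1)
        else acc)
      (r, s, c)
    = (r + ((xs.map pvFirstChar).count 'R' : Int),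
       s + ((xs.map pvFirstChar).count 'S' : Int),
       c + ((xs.map pvFirstChar).count 'C' : Int)) := by
  induction xs generalizing r s c with
  | nil => simp
  | cons n t ih =>
    simp only [List.foldl_cons, List.map_cons]
    rcases h : PySem.List.pyGet? n.toList 0 with _ | ch
    · simp [pvFirstChar, h, ih]
    · by_cases hR : ch = 'R'
      · subst hR; simp [pvFirstChar, h, ih]; omega
      · by_cases hS : ch = 'S'
        · subst hS; simp [pvFirstChar, h, ih, hR]; omega
        · by_cases hC : ch = 'C'
          · subst hC; simp [pvFirstChar, h, ih, hR, hS]; omega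
          · simp [pvFirstChar, h, ih, hR, hS, hC]

-- ===== VERDICT (by name: the statement is the Claim_ definition above) =====
theorem NUM_OF_NODE_AIOT_spec : Claim_equal_NUM_OF_NODE_AIOT := by
  intro xs _ _
  unfold Spec_NUM_OF_NODE_AIOT NUM_OF_NODE_AIOT NUM_OF_NODE_AIOT_alt
  simpa using pv_loopA_eq xs 0 0 0
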